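-- pv_equiv track=rewrite | github.com/mababou91430/ProjetAutomate | main.py | est_determinise
-- ===== SOURCE A (Python) =====
-- import copy
--
-- def est_determinise(data1, fichier_choisi):
--     """
--     Vérifie si l'automate dont le tableau (data) est mis en paramètre est déterminisé
--     Retourne True si il est déterminisé et False si ce n'est pas le cas
--     """
--     data = copy.deepcopy(data1)
--     nb_entres = 0
--     for i in range (0, len(data)):
--         if data[i][0]=="E" or data[i][0]=="E/S":
--             nb_entres += 1
--     if nb_entres > 1 :
--         return False
--     liste_etats = []
--     for i in range (0, len(data)):
--         liste_etats.append(data[i][1])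
--     for i in range (0, len(data)):
--         for j in data[i][2:]:
--             if j not in liste_etats and j!="--":
--                 return False
--     return True
-- ===== SOURCE B (Python) =====
-- def est_determinise(data1, fichier_choisi):
--     entrees = sum(1 for row in data1 if row[0] in ("E", "E/S"))
--     if entrees > 1:
--         return False
--     states = sorted(row[1] for row in data1)
--     targets = sorted(t for row in data1 for t in row[2:] if t != "--")
--     i = 0
--     for t in targets:
--         while i < len(states) and states[i] < t:
--             i += 1
--         if i == len(states) or states[i] != t:
--             return False
--     return True
-- ===== Notes on version B (the rewrite author's own statement) =====
-- stated objective: alternative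
-- what changed: Replaces A's nested per-target linear membership scan over the state list by a sorting-based subset test: sort the state names and the (non-'--') transition targets, then verify containment with a single two-pointer merge scan; the entry count becomes a sum over a filtered generator.
import Mathlib
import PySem

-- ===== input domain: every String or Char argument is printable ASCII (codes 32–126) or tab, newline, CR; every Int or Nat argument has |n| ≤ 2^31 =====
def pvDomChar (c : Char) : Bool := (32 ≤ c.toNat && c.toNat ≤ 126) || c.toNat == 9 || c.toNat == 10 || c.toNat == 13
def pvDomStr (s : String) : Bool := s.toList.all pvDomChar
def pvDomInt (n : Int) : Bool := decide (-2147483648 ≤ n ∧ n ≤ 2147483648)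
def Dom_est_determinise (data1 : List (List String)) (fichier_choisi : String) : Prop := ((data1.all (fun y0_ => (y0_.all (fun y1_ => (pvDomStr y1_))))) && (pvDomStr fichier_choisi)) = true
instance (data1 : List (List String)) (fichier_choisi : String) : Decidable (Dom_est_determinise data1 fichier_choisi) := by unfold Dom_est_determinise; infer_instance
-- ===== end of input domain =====

-- B replaces A's nested linear membership scans by a sorting-based subset test (sorted states
-- vs sorted targets, checked with a two-pointer merge scan); equivalence is about the return
-- value (A deep-copies its argument, neither mutates it).


-- ===== PORT A =====
-- inner loop 'for j in data[i][2:]: if j not in liste_etats and j != "--": return False'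
def estDetInnerA (row : List String) (liste_etats : List String) : Bool :=
  match row with
  | [] => true
  | j :: rest =>
      if !(liste_etats.contains j) && j != "--" then false
      else estDetInnerA rest liste_etats

-- outer loop over the rows, early return threaded through
def estDetRowsA (rows : List (List String)) (liste_etats : List String) : Bool :=
  match rows with
  | [] => true
  | r :: rs =>
      if estDetInnerA (PySem.List.slice r (some 2) none) liste_etats then
        estDetRowsA rs liste_etats
      else false

def est_determinise (data1 : List (List String)) (fichier_choisi : String) : Bool :=
  let data := data1   -- copy.deepcopy: same value
  let nb_entres : Int := data.foldl
    (fun n r => if PySem.List.pyGetD r 0 "" == "E" || PySem.List.pyGetD r 0 "" == "E/S" then n + 1 else n) 0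
  if nb_entres > 1 then false
  else
    let liste_etats : List String := data.foldl (fun acc r => acc ++ [PySem.List.pyGetD r 1 ""]) []
    estDetRowsA data liste_etats

-- ===== PORT B =====
-- 'while i < len(states) and states[i] < t: i += 1'
def estDetAdvB (states : List String) (t : String) (i : Nat) : Nat :=
  if i < states.length && decide (states.getD i "" < t) then estDetAdvB states t (i + 1) else i
termination_by states.length - i
decreasing_by rename_i h; simp at h; omega

-- 'for t in targets: …advance…; if i == len(states) or states[i] != t: return False'
def estDetScanB (states : List String) (targets : List String) (i : Nat) : Bool :=
  match targets with
  | [] => true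
  | t :: ts =>
      let j := estDetAdvB states t i
      if j == states.length || states.getD j "" != t then false
      else estDetScanB states ts j

def est_determinise_alt (data1 : List (List String)) (fichier_choisi : String) : Bool :=
  let entrees : Int := ((data1.filter
      (fun row => PySem.List.pyGetD row 0 "" == "E" || PySem.List.pyGetD row 0 "" == "E/S")).map
      (fun _ => (1 : Int))).sum
  if entrees > 1 then false
  else
    let states := PySem.List.sorted (data1.map (fun row => PySem.List.pyGetD row 1 "")) (fun x => x) false
    let targets := PySem.List.sorted
      (data1.flatMap (fun row => (PySem.List.slice row (some 2) none).filter (fun t => t != "--")))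
      (fun x => x) false
    estDetScanB states targets 0

-- ===== PRECONDITION & SPEC =====
-- Pre_ is exactly A's return domain: A (and B alike) raises IndexError on a row with no cell,
-- and, unless more than one entry row causes the early False return, on a row with only one cell.
def Pre_est_determinise (data1 : List (List String)) (fichier_choisi : String) : Prop :=
  (∀ r ∈ data1, r ≠ []) ∧
  (1 < data1.countP
      (fun r => PySem.List.pyGetD r 0 "" == "E" || PySem.List.pyGetD r 0 "" == "E/S") ∨
    ∀ r ∈ data1, 2 ≤ r.length)
instance (data1 : List (List String)) (fichier_choisi : String) : Decidable (Pre_est_determinise data1 fichier_choisi) := by unfold Pre_est_determinise; infer_instance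

def pvWitness_est_determinise : List (List String) × String :=
  ([["E", "q0", "q1", "--"], ["S", "q1", "q0", "q1"]], "f")

def Spec_est_determinise (data1 : List (List String)) (fichier_choisi : String) (out : Bool) : Prop := out = est_determinise_alt data1 fichier_choisi
instance (data1 : List (List String)) (fichier_choisi : String) (out : Bool) : Decidable (Spec_est_determinise data1 fichier_choisi out) := by unfold Spec_est_determinise; infer_instance

-- ===== CLAIM (what is proved, stated in full; the proofs are below) =====
def Claim_equal_est_determinise : Prop := ∀ (data1 : List (List String)) (fichier_choisi : String), Dom_est_determinise data1 fichier_choisi → Pre_est_determinise data1 fichier_choisi → Spec_est_determinise data1 fichier_choisi (est_determinise data1 fichier_choisi)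

-- ===== LEMMAS AND PROOFS =====

-- A-side characterisations
lemma estDetInnerA_iff (row L : List String) :
    estDetInnerA row L = true ↔ ∀ j ∈ row, j ∈ L ∨ j = "--" := by
  induction row with
  | nil => simp [estDetInnerA]
  | cons j rest ih =>
      simp only [estDetInnerA, List.mem_cons]
      split
      · rename_i h
        simp only [Bool.and_eq_true, Bool.not_eq_true', bne_iff_ne, ne_eq,
          List.contains_eq_mem, decide_eq_false_iff_not] at h
        constructor
        · intro hf; exact absurd hf (by simp)
        · intro hall
          rcases hall j (Or.inl rfl) with hm | he
          · exact absurd hm h.1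
          · exact absurd he h.2
      · rename_i h
        simp only [Bool.and_eq_true, Bool.not_eq_true', bne_iff_ne, ne_eq,
          List.contains_eq_mem, decide_eq_false_iff_not, not_and, not_not] at h
        rw [ih]
        constructor
        · intro hall k hk
          rcases hk with rfl | hk
          · by_cases hm : k ∈ L
            · exact Or.inl hm
            · exact Or.inr (h hm)
          · exact hall k hk
        · intro hall k hk; exact hall k (Or.inr hk)

lemma estDetRowsA_iff (rows : List (List String)) (L : List String) :
    estDetRowsA rows L = true ↔
      ∀ r ∈ rows, ∀ j ∈ PySem.List.slice r (some 2) none, j ∈ L ∨ j = "--" := by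
  induction rows with
  | nil => simp [estDetRowsA]
  | cons r rs ih =>
      simp only [estDetRowsA, List.mem_cons]
      split
      · rename_i h
        rw [ih]
        rw [estDetInnerA_iff] at h
        constructor
        · intro hall k hk
          rcases hk with rfl | hk
          · exact h
          · exact hall k hk
        · intro hall k hk; exact hall k (Or.inr hk)
      · rename_i h
        rw [estDetInnerA_iff] at h
        constructor
        · intro hf; exact absurd hf (by simp)
        · intro hall; exact absurd (hall r (Or.inl rfl)) h

lemma liste_etats_eq (data : List (List String)) (acc : List String) :
    data.foldl (fun acc r => acc ++ [PySem.List.pyGetD r 1 ""]) acc =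
      acc ++ data.map (fun r => PySem.List.pyGetD r 1 "") := by
  induction data generalizing acc with
  | nil => simp
  | cons r rs ih => simp [List.foldl, ih]

-- both entry counters are the same countP
lemma entry_counts_eq (data : List (List String))
    (p : List String → Bool) :
    data.foldl (fun n r => if p r then n + 1 else n) (0 : Int) =
      ((data.filter p).map (fun _ => (1 : Int))).sum := by
  rw [PySem.List.foldl_count_if, PySem.List.sum_map_const_int]
  simp [List.countP_eq_length_filter]

-- advB: spec of the while-loop
lemma estDetAdvB_le_self (states : List String) (t : String) (i : Nat) :
    i ≤ estDetAdvB states t i := by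
  fun_induction estDetAdvB with
  | case1 i h ih => omega
  | case2 i h => omega

lemma estDetAdvB_le_length (states : List String) (t : String) (i : Nat)
    (h : i ≤ states.length) : estDetAdvB states t i ≤ states.length := by
  fun_induction estDetAdvB with
  | case1 i h' ih => simp at h'; exact ih (by omega)
  | case2 i h' => exact h

lemma estDetAdvB_lt (states : List String) (t : String) (i : Nat) :
    ∀ k, i ≤ k → k < estDetAdvB states t i → states.getD k "" < t := by
  fun_induction estDetAdvB with
  | case1 i h ih =>
      intro k hik hk
      simp only [Bool.and_eq_true, decide_eq_true_eq] at h
      rcases Nat.eq_or_lt_of_le hik with rfl | hlt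
      · exact h.2
      · exact ih k hlt hk
  | case2 i h => intro k hik hk; omega

lemma estDetAdvB_stop (states : List String) (t : String) (i : Nat)
    (h : estDetAdvB states t i < states.length) :
    ¬ states.getD (estDetAdvB states t i) "" < t := by
  fun_induction estDetAdvB with
  | case1 i h' ih => exact ih h
  | case2 i h' =>
      intro hlt
      simp only [Bool.and_eq_true, decide_eq_true_eq, not_and, not_lt] at h'
      exact absurd (h' h) (not_le.mpr hlt)

-- merge-scan correctness on sorted lists
lemma estDetScanB_iff (states : List String)
    (hs : states.Pairwise (· ≤ ·)) :
    ∀ (targets : List String), targets.Pairwise (· ≤ ·) →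
    ∀ (i : Nat), i ≤ states.length →
    (∀ t ∈ targets, ∀ k, k < i → states.getD k "" < t) →
    (estDetScanB states targets i = true ↔ ∀ t ∈ targets, t ∈ states) := by
  intro targets
  induction targets with
  | nil => intro _ i _ _; simp [estDetScanB]
  | cons t ts ih =>
      intro hts i hi hbelow
      have hts' := (List.pairwise_cons.mp hts).2
      have htle : ∀ t' ∈ ts, t ≤ t' := (List.pairwise_cons.mp hts).1
      simp only [estDetScanB]
      set j := estDetAdvB states t i with hj
      have hij : i ≤ j := estDetAdvB_le_self states t i
      have hjlen : j ≤ states.length := estDetAdvB_le_length states t i hi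
      have hbelowj : ∀ k, k < j → states.getD k "" < t := by
        intro k hk
        by_cases hki : k < i
        · exact hbelow t (List.mem_cons_self) k hki
        · exact estDetAdvB_lt states t i k (by omega) hk
      have hsorted : ∀ p q, p ≤ q → q < states.length → states.getD p "" ≤ states.getD q "" := by
        intro p q hpq hq
        rcases Nat.eq_or_lt_of_le hpq with rfl | hlt
        · exact le_refl _
        · have := List.pairwise_iff_getElem.mp hs p q (by omega) hq hlt
          rw [List.getD_eq_getElem states "" (by omega), List.getD_eq_getElem states "" hq]
          exact this
      by_cases hcase : j = states.length ∨ states.getD j "" ≠ t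
      · -- t ∉ states
        have htnot : t ∉ states := by
          intro hmem
          obtain ⟨k, hk, hkeq⟩ := List.getElem_of_mem hmem
          have hkd : states.getD k "" = t := by rw [List.getD_eq_getElem states "" hk, hkeq]
          by_cases hkj : k < j
          · exact absurd hkd (ne_of_lt (hbelowj k hkj))
          · rcases hcase with hlen | hne
            · omega
            · have hjlt : j < states.length := by omega
              have h1 : ¬ states.getD j "" < t := estDetAdvB_stop states t i hjlt
              have h2 : states.getD j "" ≤ states.getD k "" := hsorted j k (by omega) hk
              rw [hkd] at h2
              exact hne (le_antisymm h2 (not_lt.mp h1))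
        have hguard : (j == states.length || states.getD j "" != t) = true := by
          rcases hcase with hlen | hne
          · simp [hlen]
          · have h1 : (states.getD j "" != t) = true := bne_iff_ne.mpr hne
            rw [h1, Bool.or_true]
        rw [hguard, if_pos rfl]
        constructor
        · intro hfalse; exact absurd hfalse (by simp)
        · intro hall
          exact absurd (hall t List.mem_cons_self) htnot
      · rw [not_or, not_not] at hcase
        obtain ⟨hjlt', heq⟩ := hcase
        have hjlt : j < states.length := by omega
        have hmem : t ∈ states := by
          have h := List.getD_eq_getElem states "" hjlt
          rw [h] at heq
          exact heq ▸ List.getElem_mem hjlt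
        have hguard : (j == states.length || states.getD j "" != t) = false := by
          have h1 : (j == states.length) = false := by simp [hjlt']
          have h2 : (states.getD j "" != t) = false := by
            rw [bne_eq_false_iff_eq]; exact heq
          rw [h1, h2, Bool.or_false]
        rw [hguard, if_neg (by simp)]
        rw [ih hts' j hjlen ?_]
        · constructor
          · intro hall t' ht'
            rcases List.mem_cons.mp ht' with rfl | h
            · exact hmem
            · exact hall t' h
          · intro hall t' ht'; exact hall t' (List.mem_cons_of_mem _ ht')
        · intro t' ht' k hk
          exact lt_of_lt_of_le (hbelowj k hk) (htle t' ht')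

-- ===== VERDICT (by name: the statement is the Claim_ definition above) =====
theorem est_determinise_spec : Claim_equal_est_determinise := by
  intro data1 fichier_choisi _hdom _hpre
  unfold Spec_est_determinise
  show (if data1.foldl
        (fun n r => if PySem.List.pyGetD r 0 "" == "E" || PySem.List.pyGetD r 0 "" == "E/S" then n + 1 else n)
        (0 : Int) > 1 then false
      else estDetRowsA data1 (data1.foldl (fun acc r => acc ++ [PySem.List.pyGetD r 1 ""]) [])) =
    (if ((data1.filter
        (fun row => PySem.List.pyGetD row 0 "" == "E" || PySem.List.pyGetD row 0 "" == "E/S")).map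
        (fun _ => (1 : Int))).sum > 1 then false
      else estDetScanB
        (PySem.List.sorted (data1.map (fun row => PySem.List.pyGetD row 1 "")) (fun x => x) false)
        (PySem.List.sorted
          (data1.flatMap (fun row => (PySem.List.slice row (some 2) none).filter (fun t => t != "--")))
          (fun x => x) false)
        0)
  rw [entry_counts_eq, liste_etats_eq, List.nil_append]
  by_cases hgt : ((data1.filter
      (fun row => PySem.List.pyGetD row 0 "" == "E" || PySem.List.pyGetD row 0 "" == "E/S")).map
      (fun _ => (1 : Int))).sum > 1
  · rw [if_pos hgt, if_pos hgt]
  · rw [if_neg hgt, if_neg hgt]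
    set L := data1.map (fun r => PySem.List.pyGetD r 1 "") with hL
    set states := PySem.List.sorted L (fun x => x) false with hstates
    set T := data1.flatMap (fun row => (PySem.List.slice row (some 2) none).filter (fun t => t != "--")) with hT
    set targets := PySem.List.sorted T (fun x => x) false with htargets
    have hsp : states.Pairwise (· ≤ ·) := by
      simpa using PySem.List.sorted_pairwise L (fun x => x)
    have htp : targets.Pairwise (· ≤ ·) := by
      simpa using PySem.List.sorted_pairwise T (fun x => x)
    rw [Bool.eq_iff_iff, estDetRowsA_iff,
      estDetScanB_iff states hsp targets htp 0 (Nat.zero_le _) (by intro _ _ k hk; omega)]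
    constructor
    · intro hall t ht
      rw [htargets, PySem.List.mem_sorted, hT, List.mem_flatMap] at ht
      obtain ⟨r, hr, ht⟩ := ht
      rw [List.mem_filter, bne_iff_ne] at ht
      rcases hall r hr t ht.1 with hm | he
      · rw [hstates, PySem.List.mem_sorted]; exact hm
      · exact absurd he ht.2
    · intro hall r hr j hj
      by_cases he : j = "--"
      · exact Or.inr he
      · left
        have : j ∈ targets := by
          rw [htargets, PySem.List.mem_sorted, hT, List.mem_flatMap]
          exact ⟨r, hr, List.mem_filter.mpr ⟨hj, by simp [he]⟩⟩
        have := hall j this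
        rwa [hstates, PySem.List.mem_sorted] at this
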